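-- pv_equiv track=rewrite | github.com/ValentinKlinger/prologin | qualification_2023/stabilisateurs.py | stabilite_maximale
-- ===== SOURCE A (Python) =====
-- def stabilite_maximale(n, k, p, accroches):
--
--     if k == 0 or n < 4:
--         return 0
--
--     ecart4 = []
--
--     for i in range(n - 3):
--         ecart4.append(p - (accroches[i + 3] - accroches[i]) ** 2)
--
--     couple_de_1 = max(ecart4)
--
--     if k >= 2 and n >= 8:
--         couple_de_2 = []
--         lst = ecart4[0: n - 7]
--         lst1 = ecart4[4: n - 3]
--
--         for i in lst:
--             for j in lst1:
--                 couple_de_2.append(i + j)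
--             lst1.pop(0)
--         couple_de_2 = max(couple_de_2)
--     else:
--         couple_de_2 = 0
--
--     if k == 1 or n < 8:
--         return max(couple_de_1, 0)
--     elif k >= 3 and n == 12:
--         return max(couple_de_1, couple_de_2, ecart4[0] + ecart4[4] + ecart4[8], 0)
--     elif k >= 2 or n < 12:
--         return max(couple_de_1, couple_de_2, 0)
-- ===== SOURCE B (Python) =====
-- def stabilite_maximale(n, k, p, accroches):
--     if k == 0 or n < 4:
--         return 0
--
--     ecart4 = [p - (accroches[i + 3] - accroches[i]) ** 2 for i in range(n - 3)]
--     best1 = max(ecart4)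
--
--     if k == 1 or n < 8:
--         return max(best1, 0)
--
--     # best pair sum ecart4[i] + ecart4[j] with j >= i + 4, found in one
--     # backward pass keeping the running maximum of the admissible suffix
--     m = len(ecart4)
--     runmax = ecart4[-1]
--     best2 = ecart4[-5] + runmax
--     for i in range(m - 6, -1, -1):
--         runmax = max(runmax, ecart4[i + 4])
--         best2 = max(best2, ecart4[i] + runmax)
--
--     if k >= 3 and n == 12:
--         return max(best1, best2, ecart4[0] + ecart4[4] + ecart4[8], 0)
--     return max(best1, best2, 0)
-- ===== Notes on version B (the rewrite author's own statement) =====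
-- stated objective: faster
-- what changed: The quadratic nested loop that materialises every spaced pair sum and takes its max is replaced by a single backward pass maintaining the running maximum of the admissible suffix; intended as faster (one timing run measured it, another could not confirm because A timed out on large inputs).
-- outside the precondition, e.g. on stabilite_maximale(8, -1, 100, [0, 0, 0, 0, 0, 0, 0, 0]): A returns 100, B returns 200
import Mathlib
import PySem

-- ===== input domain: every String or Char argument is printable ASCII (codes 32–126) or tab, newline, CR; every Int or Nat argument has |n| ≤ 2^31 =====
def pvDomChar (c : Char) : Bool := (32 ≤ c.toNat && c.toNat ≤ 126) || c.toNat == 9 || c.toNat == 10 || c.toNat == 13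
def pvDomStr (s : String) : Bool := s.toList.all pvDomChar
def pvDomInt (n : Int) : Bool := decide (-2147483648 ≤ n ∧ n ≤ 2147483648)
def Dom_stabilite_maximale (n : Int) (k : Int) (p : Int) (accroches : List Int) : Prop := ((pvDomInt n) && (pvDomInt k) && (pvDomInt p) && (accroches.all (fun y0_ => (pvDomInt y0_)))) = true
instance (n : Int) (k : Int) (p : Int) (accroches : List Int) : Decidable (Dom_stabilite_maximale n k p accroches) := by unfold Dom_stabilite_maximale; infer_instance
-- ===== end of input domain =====

-- B replaces A's quadratic nested pair-sum loop by a single backward pass with a running suffix maximum (intended as faster; one timing run measured 184x at n=4096, another could not confirm because A timed out); Pre_ excludes negative k with n >= 8 and too-short lists (see below).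


-- ===== PORT A =====
-- literal port of A; list max via PySem.List.max? (nonempty under Pre_), lst1.pop(0) is .drop 1
-- (the pop never hits an empty list on admitted inputs)
def stabilite_maximale (n : Int) (k : Int) (p : Int) (accroches : List Int) : Int :=
  if k = 0 ∨ n < 4 then 0
  else
    let ecart4 := (PySem.List.pyRange 0 (n - 3) 1).map
      (fun i => p - (PySem.List.pyGetD accroches (i + 3) 0 - PySem.List.pyGetD accroches i 0) ^ 2)
    let couple_de_1 := (PySem.List.max? ecart4 (fun x => x)).getD 0
    let couple_de_2 :=
      if k ≥ 2 ∧ n ≥ 8 then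
        let lst := PySem.List.slice ecart4 (some 0) (some (n - 7))
        let lst1 := PySem.List.slice ecart4 (some 4) (some (n - 3))
        let couples := (lst.foldl
          (fun (st : List Int × List Int) i => (st.1 ++ st.2.map (fun j => i + j), st.2.drop 1))
          ([], lst1)).1
        (PySem.List.max? couples (fun x => x)).getD 0
      else 0
    if k = 1 ∨ n < 8 then max couple_de_1 0
    else if k ≥ 3 ∧ n = 12 then
      max (max (max couple_de_1 couple_de_2)
        (PySem.List.pyGetD ecart4 0 0 + PySem.List.pyGetD ecart4 4 0 + PySem.List.pyGetD ecart4 8 0)) 0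
    else if k ≥ 2 ∨ n < 12 then max (max couple_de_1 couple_de_2) 0
    else 0  -- unreachable under Pre_ (Python returns None here)

-- ===== PORT B =====
def stabilite_maximale_alt (n : Int) (k : Int) (p : Int) (accroches : List Int) : Int :=
  if k = 0 ∨ n < 4 then 0
  else
    let ecart4 := (PySem.List.pyRange 0 (n - 3) 1).map
      (fun i => p - (PySem.List.pyGetD accroches (i + 3) 0 - PySem.List.pyGetD accroches i 0) ^ 2)
    let best1 := (PySem.List.max? ecart4 (fun x => x)).getD 0
    if k = 1 ∨ n < 8 then max best1 0
    else
      let m : Int := (ecart4.length : Int)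
      let st := (PySem.List.pyRange (m - 6) (-1) (-1)).foldl
        (fun (st : Int × Int) i =>
          let r := max st.1 (PySem.List.pyGetD ecart4 (i + 4) 0)
          (r, max st.2 (PySem.List.pyGetD ecart4 i 0 + r)))
        (PySem.List.pyGetD ecart4 (-1) 0,
         PySem.List.pyGetD ecart4 (-5) 0 + PySem.List.pyGetD ecart4 (-1) 0)
      let best2 := st.2
      if k ≥ 3 ∧ n = 12 then
        max (max (max best1 best2)
          (PySem.List.pyGetD ecart4 0 0 + PySem.List.pyGetD ecart4 4 0 + PySem.List.pyGetD ecart4 8 0)) 0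
      else max (max best1 best2) 0

-- ===== PRECONDITION & SPEC =====
-- Pre_ excludes (a) inputs with n > len(accroches), on which A raises IndexError, and
-- (b) negative k with n ≥ 8, on which A either falls off its if-chain returning None (n ≥ 12)
-- or takes an accidental branch ignoring pairs (8 ≤ n < 12) — a negative stabiliser count is
-- outside the task's natural domain.
def Pre_stabilite_maximale (n : Int) (k : Int) (p : Int) (accroches : List Int) : Prop :=
  (k = 0 ∨ n < 4) ∨ (n ≤ (accroches.length : Int) ∧ (0 ≤ k ∨ n < 8))
instance (n : Int) (k : Int) (p : Int) (accroches : List Int) : Decidable (Pre_stabilite_maximale n k p accroches) := by unfold Pre_stabilite_maximale; infer_instance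

def pvWitness_stabilite_maximale : Int × Int × Int × List Int :=
  (9, 2, 7, [0, 1, 2, 3, 4, 5, 6, 7, 8])

def Spec_stabilite_maximale (n : Int) (k : Int) (p : Int) (accroches : List Int) (out : Int) : Prop := out = stabilite_maximale_alt n k p accroches
instance (n : Int) (k : Int) (p : Int) (accroches : List Int) (out : Int) : Decidable (Spec_stabilite_maximale n k p accroches out) := by unfold Spec_stabilite_maximale; infer_instance

-- ===== CLAIM (what is proved, stated in full; the proofs are below) =====
def Claim_equal_stabilite_maximale : Prop := ∀ (n : Int) (k : Int) (p : Int) (accroches : List Int), Dom_stabilite_maximale n k p accroches → Pre_stabilite_maximale n k p accroches → Spec_stabilite_maximale n k p accroches (stabilite_maximale n k p accroches)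

-- ===== LEMMAS AND PROOFS =====

-- max of a nonempty list, as Python's running max (mx [] is junk 0)
def mx : List Int → Int
  | [] => 0
  | x :: t => t.foldl max x

-- the pair list A's nested loop builds: for each head x, x + every element of ys, popping ys
def pairs : List Int → List Int → List Int
  | [], _ => []
  | x :: xs, ys => ys.map (fun j => x + j) ++ pairs xs (ys.drop 1)

-- best spaced-pair sum of a list (meaningful for length ≥ 5)
def bp : List Int → Int
  | [] => 0
  | x :: xs => if xs.length ≤ 4 then x + mx (xs.drop 3)
               else max (x + mx (xs.drop 3)) (bp xs)

lemma foldl_max_shift (l : List Int) (a b : Int) :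
    l.foldl max (max a b) = max a (l.foldl max b) := by
  induction l generalizing b with
  | nil => simp
  | cons y t ih =>
      simp only [List.foldl_cons]
      rw [max_assoc, ih]

lemma foldl_max_eq_mx (l : List Int) (a : Int) (h : l ≠ []) :
    l.foldl max a = max a (mx l) := by
  cases l with
  | nil => exact absurd rfl h
  | cons x t => simp only [List.foldl_cons, mx]; exact foldl_max_shift t a x

lemma mx_append (a b : List Int) (ha : a ≠ []) (hb : b ≠ []) :
    mx (a ++ b) = max (mx a) (mx b) := by
  cases a with
  | nil => exact absurd rfl ha
  | cons x t =>
      simp only [List.cons_append, mx, List.foldl_append]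
      exact foldl_max_eq_mx b _ hb

lemma foldl_max_map_add (x : Int) (l : List Int) (y : Int) :
    (l.map (fun j => x + j)).foldl max (x + y) = x + l.foldl max y := by
  induction l generalizing y with
  | nil => simp
  | cons z t ih => simp only [List.map_cons, List.foldl_cons, max_add_add_left]; exact ih _

lemma mx_map_add (x : Int) (l : List Int) (h : l ≠ []) :
    mx (l.map (fun j => x + j)) = x + mx l := by
  cases l with
  | nil => exact absurd rfl h
  | cons y t => simp only [List.map_cons, mx]; exact foldl_max_map_add x t y

lemma mx_cons_drop (e : List Int) (j : Nat) (hj : j < e.length) (hj1 : j + 1 < e.length) :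
    mx (e.drop j) = max e[j] (mx (e.drop (j + 1))) := by
  rw [List.drop_eq_getElem_cons hj]
  have hne : e.drop (j + 1) ≠ [] := by
    intro h; have := List.length_drop (l := e) (i := j + 1); rw [h] at this; simp at this; omega
  simp only [mx]
  cases hd : e.drop (j + 1) with
  | nil => exact absurd hd hne
  | cons h t => simp only [List.foldl_cons]; exact foldl_max_shift t _ _

-- A's fold builds exactly `pairs` (accumulator generalised)
lemma foldA_eq_pairs (lst ys acc : List Int) :
    (lst.foldl
      (fun (st : List Int × List Int) i => (st.1 ++ st.2.map (fun j => i + j), st.2.drop 1))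
      (acc, ys)).1 = acc ++ pairs lst ys := by
  induction lst generalizing ys acc with
  | nil => simp [pairs]
  | cons x xs ih =>
      simp only [List.foldl_cons]
      rw [ih]
      simp [pairs, List.append_assoc]

lemma pairs_ne_nil (xs ys : List Int) (hx : xs ≠ []) (hy : ys ≠ []) : pairs xs ys ≠ [] := by
  cases xs with
  | nil => exact absurd rfl hx
  | cons a t =>
      cases ys with
      | nil => exact absurd rfl hy
      | cons b u => simp [pairs]

-- max of A's pair list = bp
lemma mx_pairs_eq_bp (e : List Int) (h : 5 ≤ e.length) :
    mx (pairs (e.take (e.length - 4)) (e.drop 4)) = bp e := by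
  induction e with
  | nil => simp at h
  | cons x xs ih =>
      have hx : (x :: xs).length - 4 = (xs.length - 4) + 1 := by
        simp only [List.length_cons] at h ⊢; omega
      rw [hx]
      simp only [List.take_succ_cons, pairs]
      have hdrop : (x :: xs).drop 4 = xs.drop 3 := rfl
      have hdrop1 : (xs.drop 3).drop 1 = xs.drop 4 := by rw [List.drop_drop]
      have hne3 : xs.drop 3 ≠ [] := by
        apply List.ne_nil_of_length_pos
        simp only [List.length_cons] at h
        simp; omega
      rw [hdrop, hdrop1]
      by_cases h5 : xs.length ≤ 4
      · have h4 : xs.length = 4 := by simp only [List.length_cons] at h; omega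
        have ht : xs.take (xs.length - 4) = [] := by simp [h4]
        rw [ht]
        simp only [pairs, List.append_nil]
        rw [mx_map_add _ _ hne3]
        simp [bp, h5]
      · have hxs5 : 5 ≤ xs.length := by omega
        have hne4 : xs.take (xs.length - 4) ≠ [] := by
          apply List.ne_nil_of_length_pos
          simp; omega
        have hne4' : xs.drop 4 ≠ [] := by
          apply List.ne_nil_of_length_pos
          simp; omega
        rw [mx_append _ _ (fun hc => hne3 (List.map_eq_nil_iff.mp hc)) (pairs_ne_nil _ _ hne4 hne4'),
            mx_map_add _ _ hne3, ih hxs5]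
        simp [bp, h5]

-- bp unfolding in getElem form
lemma bp_drop (e : List Int) (a : Nat) (ha : a + 6 ≤ e.length) :
    bp (e.drop a) = max (e[a]'(by omega) + mx (e.drop (a + 4))) (bp (e.drop (a + 1))) := by
  rw [List.drop_eq_getElem_cons (by omega : a < e.length)]
  have hlen : (e.drop (a + 1)).length = e.length - (a + 1) := by simp
  have hd3 : (e.drop (a + 1)).drop 3 = e.drop (a + 4) := by
    rw [List.drop_drop]
  simp only [bp, hd3]
  rw [if_neg (by omega)]

lemma bp_five (e : List Int) (h5 : e.length = 5 + 0) (a : Nat) (ha : a + 5 = e.length) :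
    bp (e.drop a) = e[a]'(by omega) + mx (e.drop (a + 4)) := by
  rw [List.drop_eq_getElem_cons (by omega : a < e.length)]
  have hd3 : (e.drop (a + 1)).drop 3 = e.drop (a + 4) := by rw [List.drop_drop]
  simp only [bp, hd3]
  rw [if_pos (by simp; omega)]

-- B's backward fold computes bp (downward induction over the countdown range)
lemma foldB_eq_bp (e : List Int) (a : Nat) (ha : a + 6 ≤ e.length) :
    ((PySem.List.pyRange (a : Int) (-1) (-1)).foldl
      (fun (st : Int × Int) i =>
        let r := max st.1 (PySem.List.pyGetD e (i + 4) 0)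
        (r, max st.2 (PySem.List.pyGetD e i 0 + r)))
      (mx (e.drop (a + 5)), bp (e.drop (a + 1)))) = (mx (e.drop 4), bp e) := by
  induction a with
  | zero =>
      rw [PySem.List.pyRange_neg_one_cons (by omega)]
      rw [PySem.List.pyRange_neg_one_eq_nil (by omega)]
      simp only [List.foldl_cons, List.foldl_nil, Nat.cast_zero]
      have h4 : PySem.List.pyGetD e ((0 : Int) + 4) 0 = e[4]'(by omega) := by
        rw [PySem.List.pyGetD_eq_getElem e 0 (by omega) (by omega)]
        simp
      have h0 : PySem.List.pyGetD e (0 : Int) 0 = e[0]'(by omega) := by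
        rw [PySem.List.pyGetD_eq_getElem e 0 (by omega) (by omega)]
        simp
      simp only [h4, h0]
      have hr0 : max (mx (e.drop (0 + 5))) (e[4]'(by omega)) = mx (e.drop 4) := by
        rw [max_comm, ← mx_cons_drop e 4 (by omega) (by omega)]
      rw [hr0]
      have hb0 := bp_drop e 0 ha
      simp only [List.drop_zero, Nat.zero_add] at hb0
      rw [hb0]
      simp [max_comm]
  | succ a ih =>
      rw [PySem.List.pyRange_neg_one_cons (by omega)]
      simp only [List.foldl_cons]
      have hcast : ((a : Int) + 1) - 1 = (a : Int) := by ring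
      have h4 : PySem.List.pyGetD e (((a : Int) + 1) + 4) 0 = e[a + 5]'(by omega) := by
        rw [PySem.List.pyGetD_eq_getElem e 0 (by omega) (by push_cast; omega)]
        congr 1
      have h0 : PySem.List.pyGetD e (((a : Int) + 1)) 0 = e[a + 1]'(by omega) := by
        rw [PySem.List.pyGetD_eq_getElem e 0 (by omega) (by push_cast; omega)]
        congr 1
      push_cast
      simp only [h4, h0, hcast]
      have hr : max (mx (e.drop (a + 1 + 5))) (e[a + 5]'(by omega)) = mx (e.drop (a + 5)) := by
        rw [show a + 1 + 5 = a + 6 by omega, max_comm, ← mx_cons_drop e (a + 5) (by omega) (by omega)]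
      have hb : max (bp (e.drop (a + 1 + 1))) (e[a + 1]'(by omega) + mx (e.drop (a + 5))) =
          bp (e.drop (a + 1)) := by
        rw [max_comm, bp_drop e (a + 1) (by omega)]
      rw [hr, hb]
      exact ih (by omega)
-- length of ecart4
lemma ecart4_length (n p : Int) (accroches : List Int) :
    ((PySem.List.pyRange 0 (n - 3) 1).map
      (fun i => p - (PySem.List.pyGetD accroches (i + 3) 0 - PySem.List.pyGetD accroches i 0) ^ 2)).length
      = (n - 3).toNat := by
  rw [List.length_map, PySem.List.length_pyRange_one]
  congr 1; omega

-- ===== VERDICT (by name: the statement is the Claim_ definition above) =====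
theorem stabilite_maximale_spec : Claim_equal_stabilite_maximale := by
  intro n k p accroches _hdom hpre
  unfold Spec_stabilite_maximale stabilite_maximale stabilite_maximale_alt
  by_cases h0 : k = 0 ∨ n < 4
  · simp [h0]
  rw [if_neg h0, if_neg h0]
  set e := (PySem.List.pyRange 0 (n - 3) 1).map
      (fun i => p - (PySem.List.pyGetD accroches (i + 3) 0 - PySem.List.pyGetD accroches i 0) ^ 2)
    with he
  have hlen : e.length = (n - 3).toNat := ecart4_length n p accroches
  by_cases h1 : k = 1 ∨ n < 8
  · have hguard : ¬ (k ≥ 2 ∧ n ≥ 8) := by rcases h1 with h | h <;> intro ⟨h2, h8⟩ <;> omega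
    simp only [if_neg hguard, if_pos h1]
  · -- here k ≥ 2 and n ≥ 8
    have hk2 : k ≥ 2 := by
      rcases hpre with h | ⟨_, h⟩
      · omega
      · rcases h with h | h <;> omega
    have hn8 : n ≥ 8 := by omega
    have hguard : k ≥ 2 ∧ n ≥ 8 := ⟨hk2, hn8⟩
    have hlen5 : 5 ≤ e.length := by omega
    simp only [if_pos hguard, if_neg h1]
    -- identify A's couple_de_2 with B's best2
    have hslice0 : PySem.List.slice e (some 0) (some (n - 7)) = e.take (e.length - 4) := by
      rw [PySem.List.slice_zero_start, PySem.List.slice_to e (by omega : (0:Int) ≤ n - 7)]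
      congr 1; omega
    have hslice4 : PySem.List.slice e (some 4) (some (n - 3)) = e.drop 4 := by
      rw [PySem.List.slice_toNat e (by omega : (0:Int) ≤ 4) (by omega : (0:Int) ≤ n - 3)]
      rw [show (4 : Int).toNat = 4 from rfl]
      apply List.take_of_length_le
      simp only [List.length_drop]
      omega
    have htake_ne : e.take (e.length - 4) ≠ [] := by
      apply List.ne_nil_of_length_pos
      simp only [List.length_take]
      omega
    have hdrop_ne : e.drop 4 ≠ [] := by
      apply List.ne_nil_of_length_pos
      simp only [List.length_drop]
      omega
    have hApairs :
        ((e.take (e.length - 4)).foldl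
          (fun (st : List Int × List Int) i => (st.1 ++ st.2.map (fun j => i + j), st.2.drop 1))
          ([], e.drop 4)).1 = pairs (e.take (e.length - 4)) (e.drop 4) := by
      rw [foldA_eq_pairs]; simp
    have hAmax :
        (PySem.List.max? (pairs (e.take (e.length - 4)) (e.drop 4)) (fun x => x)).getD 0 = bp e := by
      cases hc : pairs (e.take (e.length - 4)) (e.drop 4) with
      | nil => exact absurd hc (pairs_ne_nil _ _ htake_ne hdrop_ne)
      | cons c t =>
          rw [PySem.List.max?_id_cons]
          simp only [Option.getD_some]
          have := mx_pairs_eq_bp e hlen5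
          rw [hc] at this
          simpa [mx] using this
    -- B's fold
    have hBfold :
        ((PySem.List.pyRange ((e.length : Int) - 6) (-1) (-1)).foldl
          (fun (st : Int × Int) i =>
            let r := max st.1 (PySem.List.pyGetD e (i + 4) 0)
            (r, max st.2 (PySem.List.pyGetD e i 0 + r)))
          (PySem.List.pyGetD e (-1) 0,
           PySem.List.pyGetD e (-5) 0 + PySem.List.pyGetD e (-1) 0)).2 = bp e := by
      have hm1 : PySem.List.pyGetD e (-1) 0 = e[e.length - 1]'(by omega) := by
        have := PySem.List.pyGetD_neg_natCast e 1 0 (by omega) (by omega)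
        simpa using this
      have hm5 : PySem.List.pyGetD e (-5) 0 = e[e.length - 5]'(by omega) := by
        have := PySem.List.pyGetD_neg_natCast e 5 0 (by omega) (by omega)
        simpa using this
      by_cases h6 : 6 ≤ e.length
      · have ha : (e.length - 6) + 6 ≤ e.length := by omega
        have hcast : ((e.length : Int) - 6) = ((e.length - 6 : Nat) : Int) := by omega
        rw [hcast, hm1, hm5]
        have hinit1 : e[e.length - 1]'(by omega) = mx (e.drop ((e.length - 6) + 5)) := by
          have hdd : e.drop (e.length - 1) = [e[e.length - 1]'(by omega)] := by
            rw [List.drop_eq_getElem_cons (by omega)]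
            rw [List.drop_eq_nil_of_le (by omega)]
          rw [show (e.length - 6) + 5 = e.length - 1 by omega, hdd]
          simp [mx]
        have hinit2 : e[e.length - 5]'(by omega) + e[e.length - 1]'(by omega)
            = bp (e.drop ((e.length - 6) + 1)) := by
          have h51 : (e.length - 6) + 1 = e.length - 5 := by omega
          rw [h51, List.drop_eq_getElem_cons (by omega : e.length - 5 < e.length)]
          have hlen4 : (e.drop (e.length - 5 + 1)).length = 4 := by
            simp only [List.length_drop]; omega
          simp only [bp, hlen4]
          rw [if_pos (by omega)]
          congr 1
          have hdd : (e.drop (e.length - 5 + 1)).drop 3 = e.drop (e.length - 1) := by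
            rw [List.drop_drop]; congr 1; omega
          rw [hdd, List.drop_eq_getElem_cons (by omega : e.length - 1 < e.length)]
          rw [List.drop_eq_nil_of_le (by omega)]
          simp [mx]
        rw [hinit2, hinit1, foldB_eq_bp e (e.length - 6) ha]
      · -- e.length = 5 : empty countdown range
        have h5 : e.length = 5 := by omega
        rw [PySem.List.pyRange_neg_one_eq_nil (by rw [h5]; norm_num)]
        simp only [List.foldl_nil]
        rw [hm1, hm5]
        have hbp := bp_five e (by omega) 0 (by omega)
        simp only [List.drop_zero, Nat.zero_add] at hbp
        rw [hbp]
        have hdd : e.drop 4 = [e[4]'(by omega)] := by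
          rw [List.drop_eq_getElem_cons (by omega)]
          rw [List.drop_eq_nil_of_le (by omega)]
        congr 1
        · congr 1; omega
        · rw [hdd]; simp [mx]; congr 1; omega
    simp only [hslice0, hslice4, hApairs, hAmax, hBfold]
    by_cases h12 : k ≥ 3 ∧ n = 12
    · rw [if_pos h12, if_pos h12]
    · rw [if_neg h12, if_neg h12, if_pos (Or.inl hk2)]
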